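-- pv_equiv track=rewrite | github.com/shubham1singh23/Ospracticle | MonkeyBanana.py | bfs
-- ===== SOURCE A (Python) =====
-- from collections import deque
--
-- positions = [0, 1, 2, 3, 4]
--
-- banana_pos = 4
--
-- def get_next_states(state):
--     m, b, on_box, has_banana = state
--     next_states = []
--
--     if has_banana:
--         return []
--
--     # Walk (left or right)
--     if not on_box:
--         if m - 1 in positions:
--             next_states.append((m - 1, b, False, False))
--         if m + 1 in positions:
--             next_states.append((m + 1, b, False, False))
--
--     # Push box
--     if m == b and not on_box:
--         if m - 1 in positions:
--             next_states.append((m - 1, b - 1, False, False))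
--         if m + 1 in positions:
--             next_states.append((m + 1, b + 1, False, False))
--
--     # Climb box
--     if m == b and not on_box:
--         next_states.append((m, b, True, False))
--
--     # Grasp banana
--     if m == banana_pos and on_box:
--         next_states.append((m, b, True, True))
--
--     return next_states
--
-- def bfs(start):
--     queue = deque([(start, [])])
--     visited = set()
--
--     while queue:
--         state, path = queue.popleft()
--
--         if state in visited:
--             continue
--
--         visited.add(state)
--
--         if state[3]:  # has banana
--             return path + [state]
--
--         for nxt in get_next_states(state):
--             queue.append((nxt, path + [state]))
--
--     return None
-- ===== SOURCE B (Python) =====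
-- from collections import deque
--
-- positions = [0, 1, 2, 3, 4]
--
-- banana_pos = 4
--
-- def get_next_states(state):
--     m, b, on_box, has_banana = state
--     next_states = []
--
--     if has_banana:
--         return []
--
--     # Walk (left or right)
--     if not on_box:
--         if m - 1 in positions:
--             next_states.append((m - 1, b, False, False))
--         if m + 1 in positions:
--             next_states.append((m + 1, b, False, False))
--
--     # Push box
--     if m == b and not on_box:
--         if m - 1 in positions:
--             next_states.append((m - 1, b - 1, False, False))
--         if m + 1 in positions:
--             next_states.append((m + 1, b + 1, False, False))
--
--     # Climb box
--     if m == b and not on_box: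
--         next_states.append((m, b, True, False))
--
--     # Grasp banana
--     if m == banana_pos and on_box:
--         next_states.append((m, b, True, True))
--
--     return next_states
--
-- def bfs(start):
--     parent = {start: None}
--     queue = deque([start])
--     while queue:
--         state = queue.popleft()
--         if state[3]:  # has banana: rebuild the path from parent pointers
--             path = []
--             cur = state
--             while cur is not None:
--                 path.append(cur)
--                 cur = parent[cur]
--             path.reverse()
--             return path
--         for nxt in get_next_states(state):
--             if nxt not in parent:
--                 parent[nxt] = state
--                 queue.append(nxt)
--     return None
-- ===== Notes on version B (the rewrite author's own statement) =====
-- stated objective: alternative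
-- what changed: A's BFS queues (state, full-path) pairs, copying the path on every enqueue and checking visited lazily at pop time; B queues bare states with an eagerly-filled parent dictionary and reconstructs the solution path from parent pointers only when the goal state is popped.
import Mathlib
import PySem

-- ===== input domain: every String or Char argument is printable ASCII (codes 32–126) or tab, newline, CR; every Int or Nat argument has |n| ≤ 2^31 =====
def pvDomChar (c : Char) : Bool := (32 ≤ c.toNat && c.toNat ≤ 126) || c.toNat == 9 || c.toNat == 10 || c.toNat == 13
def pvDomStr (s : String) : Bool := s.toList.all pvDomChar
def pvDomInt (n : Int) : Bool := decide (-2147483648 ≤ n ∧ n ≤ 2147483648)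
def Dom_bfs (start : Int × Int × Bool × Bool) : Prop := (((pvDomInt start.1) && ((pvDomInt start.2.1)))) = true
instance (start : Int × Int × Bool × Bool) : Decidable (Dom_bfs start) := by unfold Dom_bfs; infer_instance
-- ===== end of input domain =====

-- B replaces A's queue of (state, path) pairs (paths copied on every enqueue, lazy visited check)
-- by a queue of bare states with an eagerly-filled parent dictionary; the solution path is
-- reconstructed from the parent pointers only when the goal state is popped.

-- ===== PORT A =====
def positionsL : List Int := [0, 1, 2, 3, 4]

def getNextStates (s : Int × Int × Bool × Bool) : List (Int × Int × Bool × Bool) :=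
  match s with
  | (m, b, onBox, hasB) =>
    if hasB then []
    else
      -- Walk (left or right)
      (if onBox = false then
        (if positionsL.contains (m - 1) then [(m - 1, b, false, false)] else []) ++
        (if positionsL.contains (m + 1) then [(m + 1, b, false, false)] else [])
       else []) ++
      -- Push box
      (if m = b ∧ onBox = false then
        (if positionsL.contains (m - 1) then [(m - 1, b - 1, false, false)] else []) ++
        (if positionsL.contains (m + 1) then [(m + 1, b + 1, false, false)] else [])
       else []) ++
      -- Climb box
      (if m = b ∧ onBox = false then [(m, b, true, false)] else []) ++
      -- Grasp banana
      (if m = 4 ∧ onBox = true then [(m, b, true, true)] else [])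

-- A's BFS loop: queue of (state, path); fuel only makes the recursion structural
-- (1000 is far above the loop's real iteration count on every input: the queue empties first).
def loopA : Nat → List ((Int × Int × Bool × Bool) × List (Int × Int × Bool × Bool)) →
    PySem.Set (Int × Int × Bool × Bool) → Option (List (Int × Int × Bool × Bool))
  | _, [], _ => none
  | 0, _, _ => none
  | f + 1, (s, p) :: q, v =>
    if PySem.Set.contains v s then loopA f q v
    else
      let v' := PySem.Set.add v s
      if s.2.2.2 then some (p ++ [s])
      else loopA f (q ++ (getNextStates s).map (fun t => (t, p ++ [s]))) v'

def bfs (start : Int × Int × Bool × Bool) : Option (List (Int × Int × Bool × Bool)) :=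
  loopA 1000 [(start, [])] PySem.Set.empty

-- ===== PORT B =====
-- path reconstruction: follow parent pointers, then reverse (the inner while of Source B)
def chainB : Nat → PySem.Dict (Int × Int × Bool × Bool) (Option (Int × Int × Bool × Bool)) →
    Option (Int × Int × Bool × Bool) → List (Int × Int × Bool × Bool) → List (Int × Int × Bool × Bool)
  | _, _, none, path => path
  | 0, _, some _, path => path
  | f + 1, par, some cur, path => chainB f par (PySem.Dict.getD par cur none) (path ++ [cur])

-- B's BFS loop: queue of bare states, parent dictionary filled at discovery time.
def loopB : Nat → List (Int × Int × Bool × Bool) →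
    PySem.Dict (Int × Int × Bool × Bool) (Option (Int × Int × Bool × Bool)) →
    Option (List (Int × Int × Bool × Bool))
  | _, [], _ => none
  | 0, _, _ => none
  | f + 1, s :: q, par =>
    if s.2.2.2 then some ((chainB (f + 1) par (some s) []).reverse)
    else
      let qp := (getNextStates s).foldl
        (fun (acc : List (Int × Int × Bool × Bool) ×
              PySem.Dict (Int × Int × Bool × Bool) (Option (Int × Int × Bool × Bool))) t =>
          if acc.2.contains t then acc else (acc.1 ++ [t], acc.2.insert t (some s)))
        (q, par)
      loopB f qp.1 qp.2

def bfs_alt (start : Int × Int × Bool × Bool) : Option (List (Int × Int × Bool × Bool)) :=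
  loopB 1000 [start] (PySem.Dict.ofList [(start, none)])

-- ===== PRECONDITION & SPEC =====
def Spec_bfs (start : Int × Int × Bool × Bool) (out : Option (List (Int × Int × Bool × Bool))) : Prop := out = bfs_alt start
instance (start : Int × Int × Bool × Bool) (out : Option (List (Int × Int × Bool × Bool))) : Decidable (Spec_bfs start out) := by unfold Spec_bfs; infer_instance

-- ===== CLAIM (what is proved, stated in full; the proofs are below) =====
def Claim_equal_bfs : Prop := ∀ (start : Int × Int × Bool × Bool), Dom_bfs start → Spec_bfs start (bfs start)

-- ===== LEMMAS AND PROOFS =====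

-- A state from which the banana can never be grasped (and which is not itself a goal state):
-- closed under getNextStates, hence BFS from a queue of such states returns none.
def Hopeless (s : Int × Int × Bool × Bool) : Prop :=
  s.2.2.2 = false ∧
  ((s.2.2.1 = true ∧ s.1 ≠ 4) ∨
   (s.2.2.1 = false ∧ s.1 ≠ s.2.1 ∧ (s.2.1 < 0 ∨ 4 < s.2.1 ∨ s.1 < -1 ∨ 5 < s.1)) ∨
   (s.2.2.1 = false ∧ s.1 = s.2.1 ∧ (s.1 < -1 ∨ 5 < s.1)))

lemma hopeless_closed {s t : Int × Int × Bool × Bool} (hs : Hopeless s)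
    (ht : t ∈ getNextStates s) : Hopeless t := by
  obtain ⟨m, b, o, h⟩ := s
  obtain ⟨hh, hcase⟩ := hs
  simp only at hh
  subst hh
  rcases hcase with ⟨ho, hm⟩ | ⟨ho, hmb, hside⟩ | ⟨ho, hmb, hside⟩
  · -- on the box, m ≠ 4 : the only candidate successor is the grasp, which needs m = 4
    simp only at ho hm
    subst ho
    simp [getNextStates] at ht
    exact absurd ht.1 hm
  · -- off the box, m ≠ b : only walking successors, which stay hopeless
    simp only at ho hmb hside
    subst ho
    simp [getNextStates, positionsL, hmb] at ht
    rcases ht with ⟨hc, rfl⟩ | ⟨hc, rfl⟩ <;> (simp only [Hopeless]; simp; omega)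
  · -- off the box, m = b, m outside [-1,5] : walking/pushing impossible, climbing stays hopeless
    simp only at ho hmb hside
    subst ho
    simp [getNextStates, positionsL] at ht
    rcases ht with ⟨hc, rfl⟩ | ⟨hc, rfl⟩ | ⟨_, ⟨hc, rfl⟩ | ⟨hc, rfl⟩⟩ | ⟨_, rfl⟩
    · exact (by omega : False).elim
    · exact (by omega : False).elim
    · exact (by omega : False).elim
    · exact (by omega : False).elim
    · simp only [Hopeless]; simp; omega

lemma hopelessA : ∀ (f : Nat) (q : List ((Int × Int × Bool × Bool) × List (Int × Int × Bool × Bool)))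
    (v : PySem.Set (Int × Int × Bool × Bool)),
    (∀ x ∈ q, Hopeless x.1) → loopA f q v = none := by
  intro f
  induction f with
  | zero => intro q v _; cases q <;> simp [loopA]
  | succ f ih =>
    intro q v hq
    cases q with
    | nil => simp [loopA]
    | cons x q' =>
      obtain ⟨s, p⟩ := x
      have hs : Hopeless s := hq (s, p) (List.mem_cons_self ..)
      simp only [loopA]
      split
      · exact ih q' v (fun x hx => hq x (List.mem_cons_of_mem _ hx))
      · simp only [hs.1]
        apply ih
        intro x hx
        rcases List.mem_append.mp hx with hx | hx
        · exact hq x (List.mem_cons_of_mem _ hx)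
        · obtain ⟨t, htm, hte⟩ := List.mem_map.mp hx
          subst hte
          exact hopeless_closed hs htm

lemma hopelessB : ∀ (f : Nat) (q : List (Int × Int × Bool × Bool))
    (par : PySem.Dict (Int × Int × Bool × Bool) (Option (Int × Int × Bool × Bool))),
    (∀ s ∈ q, Hopeless s) → loopB f q par = none := by
  intro f
  induction f with
  | zero => intro q par _; cases q <;> simp [loopB]
  | succ f ih =>
    intro q par hq
    cases q with
    | nil => simp [loopB]
    | cons s q' =>
      have hs : Hopeless s := hq s (List.mem_cons_self ..)
      simp only [loopB, hs.1]
      apply ih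
      -- the folded queue consists of old entries and fresh successors of s
      have key : ∀ (l : List (Int × Int × Bool × Bool)) (q₀ : List (Int × Int × Bool × Bool)) par₀,
          (∀ x ∈ q₀, Hopeless x) → (∀ x ∈ l, Hopeless x) →
          ∀ x ∈ (l.foldl (fun (acc : List (Int × Int × Bool × Bool) ×
              PySem.Dict (Int × Int × Bool × Bool) (Option (Int × Int × Bool × Bool))) t =>
              if acc.2.contains t then acc else (acc.1 ++ [t], acc.2.insert t (some s)))
              (q₀, par₀)).1, Hopeless x := by
        intro l
        induction l with
        | nil => intro q₀ par₀ hq₀ _ x hx; exact hq₀ x hx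
        | cons t l ihl =>
          intro q₀ par₀ hq₀ hl x hx
          simp only [List.foldl_cons] at hx
          by_cases hc : par₀.contains t
          · simp only [hc, if_true] at hx
            exact ihl q₀ par₀ hq₀ (fun y hy => hl y (List.mem_cons_of_mem _ hy)) x hx
          · simp only [hc] at hx
            refine ihl _ _ ?_ (fun y hy => hl y (List.mem_cons_of_mem _ hy)) x hx
            intro y hy
            rcases List.mem_append.mp hy with hy | hy
            · exact hq₀ y hy
            · rw [List.mem_singleton.mp hy]
              exact hl t (List.mem_cons_self ..)
      exact key _ q' par (fun x hx => hq x (List.mem_cons_of_mem _ hx))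
        (fun x hx => hopeless_closed hs hx)

-- start already holds the banana: one loop step on either side
lemma grabbedA (f : Nat) (m b : Int) (o : Bool) :
    loopA (f + 1) [((m, b, o, true), [])] PySem.Set.empty = some [(m, b, o, true)] := by
  simp [loopA, PySem.Set.empty, PySem.Set.contains]

lemma grabbedB (f : Nat) (m b : Int) (o : Bool) :
    loopB (f + 1) [(m, b, o, true)] (PySem.Dict.ofList [((m, b, o, true), none)]) =
      some [(m, b, o, true)] := by
  simp [loopB, chainB, PySem.Dict.ofList, PySem.Dict.update, PySem.Dict.getD_insert_self]

-- on the box under the banana: grasp, then the goal state is popped (two steps each side)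
lemma graspA (f : Nat) (b : Int) :
    loopA (f + 1 + 1 + 1) [((4, b, true, false), [])] PySem.Set.empty =
      some [(4, b, true, false), (4, b, true, true)] := by
  simp [loopA, getNextStates, PySem.Set.empty, PySem.Set.contains, PySem.Set.add]

lemma graspB (f : Nat) (b : Int) :
    loopB (f + 1 + 1 + 1) [(4, b, true, false)] (PySem.Dict.ofList [((4, b, true, false), none)]) =
      some [(4, b, true, false), (4, b, true, true)] := by
  simp [loopB, chainB, getNextStates, PySem.Dict.ofList, PySem.Dict.update,
    PySem.Dict.contains_insert, PySem.Dict.getD_insert_self, PySem.Dict.getD_insert_of_ne]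

-- ===== VERDICT (by name: the statement is the Claim_ definition above) =====
theorem bfs_spec : Claim_equal_bfs := by
  intro start _
  unfold Spec_bfs
  obtain ⟨m, b, o, h⟩ := start
  cases h with
  | true =>
    have e : (1000 : Nat) = 999 + 1 := by norm_num
    unfold bfs bfs_alt
    rw [e, grabbedA, grabbedB]
  | false =>
    cases o with
    | true =>
      by_cases hm : m = 4
      · subst hm
        have e : (1000 : Nat) = 997 + 1 + 1 + 1 := by norm_num
        unfold bfs bfs_alt
        rw [e, graspA, graspB]
      · have hp : Hopeless (m, b, true, false) := ⟨rfl, Or.inl ⟨rfl, hm⟩⟩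
        unfold bfs bfs_alt
        rw [hopelessA _ _ _ (by intro x hx; rw [List.mem_singleton.mp hx]; exact hp),
          hopelessB _ _ _ (by intro x hx; rw [List.mem_singleton.mp hx]; exact hp)]
    | false =>
      by_cases hbox : -1 ≤ m ∧ m ≤ 5 ∧ -1 ≤ b ∧ b ≤ 5
      · obtain ⟨h1, h2, h3, h4⟩ := hbox
        interval_cases m <;> interval_cases b <;> decide
      · have hp : Hopeless (m, b, false, false) := by
          simp only [Hopeless]; simp; omega
        unfold bfs bfs_alt
        rw [hopelessA _ _ _ (by intro x hx; rw [List.mem_singleton.mp hx]; exact hp),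
          hopelessB _ _ _ (by intro x hx; rw [List.mem_singleton.mp hx]; exact hp)]
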